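-- pv_equiv track=rewrite | github.com/saeedserwana/aieditor | acttech/patch_apply.py | _insert_after
-- ===== SOURCE A (Python) =====
-- from typing import Dict, Any, List, Optional, Tuple
--
-- def _insert_after(text: str, match: str, insert_text: str, once: bool = True) -> str:
--     lines = text.splitlines(True)
--     out: List[str] = []
--     inserted = False
--     for ln in lines:
--         out.append(ln)
--         if match in ln and (not inserted or not once):
--             out.append(insert_text)
--             inserted = True
--     return "".join(out)
-- ===== SOURCE B (Python) =====
-- def _insert_after(text: str, match: str, insert_text: str, once: bool = True) -> str:
--     lines = text.splitlines(True)
--     # phase 1: index of matching line positions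
--     idx = [i for i, ln in enumerate(lines) if match in ln]
--     if once:
--         idx = idx[:1]
--     # phase 2: rebuild, inserting after each indexed line
--     out = []
--     for i, ln in enumerate(lines):
--         out.append(ln)
--         if i in idx:
--             out.append(insert_text)
--     return "".join(out)
-- ===== Notes on version B (the rewrite author's own statement) =====
-- stated objective: alternative
-- what changed: A's single fused scan with an 'inserted' flag is replaced by two separate phases: one pass building an index list of matching line positions (truncated to its first element when once), then an independent rebuild pass that inserts after each indexed line.
import Mathlib
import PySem

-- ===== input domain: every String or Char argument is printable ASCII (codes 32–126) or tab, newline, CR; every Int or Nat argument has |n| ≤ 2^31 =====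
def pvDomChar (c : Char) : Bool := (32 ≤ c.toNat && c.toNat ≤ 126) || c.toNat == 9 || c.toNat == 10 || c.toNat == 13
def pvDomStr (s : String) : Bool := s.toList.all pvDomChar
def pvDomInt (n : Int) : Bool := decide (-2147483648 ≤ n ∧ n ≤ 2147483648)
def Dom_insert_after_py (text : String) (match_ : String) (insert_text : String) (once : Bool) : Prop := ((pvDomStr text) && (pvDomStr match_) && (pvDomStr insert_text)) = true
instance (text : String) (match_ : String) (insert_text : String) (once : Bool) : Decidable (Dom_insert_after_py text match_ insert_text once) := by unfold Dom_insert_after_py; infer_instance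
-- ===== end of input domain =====

-- B replaces A's fused scan-with-flag by an index-building phase plus a separate rebuild phase (alternative decomposition, same cost).

-- ===== PORT A =====
-- hand port of str.splitlines(keepends=True), shared by both ports (both Pythons call the same builtin);
-- exact on the Dom charset, where the only line boundaries are '\n', '\r' and '\r\n'
def pvSplitlinesKeep : List Char → List Char → List (List Char)
  | [], acc => if acc.isEmpty then [] else [acc.reverse]
  | '\r' :: '\n' :: rest, acc => (acc.reverse ++ ['\r', '\n']) :: pvSplitlinesKeep rest []
  | '\r' :: rest, acc => (acc.reverse ++ ['\r']) :: pvSplitlinesKeep rest []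
  | '\n' :: rest, acc => (acc.reverse ++ ['\n']) :: pvSplitlinesKeep rest []
  | c :: rest, acc => pvSplitlinesKeep rest (c :: acc)

-- A's loop: append the line, and after it the insert when it matches and (not inserted or not once)
def pvGoA (mt it : List Char) (once : Bool) : List (List Char) → Bool → List (List Char)
  | [], _ => []
  | ln :: rest, inserted =>
      if PySem.Chars.isIn mt ln && (!inserted || !once) then
        ln :: it :: pvGoA mt it once rest true
      else
        ln :: pvGoA mt it once rest inserted

def insert_after_py (text : String) (match_ : String) (insert_text : String) (once : Bool) : String :=
  let lines := pvSplitlinesKeep text.toList []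
  String.mk (PySem.Chars.join [] (pvGoA match_.toList insert_text.toList once lines false))

-- ===== PORT B =====
-- phase 1: index list of matching positions (first only when once)
def pvIdxB (mt : List Char) (once : Bool) (lines : List (List Char)) : List Int :=
  let idx0 := ((PySem.List.enumerate lines 0).filter (fun p => PySem.Chars.isIn mt p.2)).map Prod.fst
  if once then idx0.take 1 else idx0

-- phase 2: rebuild, inserting after each indexed line
def pvRebuildB (it : List Char) (idx : List Int) (lines : List (List Char)) : List (List Char) :=
  (PySem.List.enumerate lines 0).flatMap (fun p => if p.1 ∈ idx then [p.2, it] else [p.2])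

def insert_after_py_alt (text : String) (match_ : String) (insert_text : String) (once : Bool) : String :=
  let lines := pvSplitlinesKeep text.toList []
  String.mk (PySem.Chars.join [] (pvRebuildB insert_text.toList (pvIdxB match_.toList once lines) lines))

-- ===== PRECONDITION & SPEC =====
def Spec_insert_after_py (text : String) (match_ : String) (insert_text : String) (once : Bool) (out : String) : Prop := out = insert_after_py_alt text match_ insert_text once
instance (text : String) (match_ : String) (insert_text : String) (once : Bool) (out : String) : Decidable (Spec_insert_after_py text match_ insert_text once out) := by unfold Spec_insert_after_py; infer_instance

-- ===== CLAIM (what is proved, stated in full; the proofs are below) =====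
def Claim_equal_insert_after_py : Prop := ∀ (text : String) (match_ : String) (insert_text : String) (once : Bool), Dom_insert_after_py text match_ insert_text once → Spec_insert_after_py text match_ insert_text once (insert_after_py text match_ insert_text once)

-- ===== LEMMAS AND PROOFS =====

-- every index produced by phase 1 (before truncation) over enumerate lines s is >= s
lemma pvIdx0_ge (mt : List Char) (lines : List (List Char)) (s : Int) :
    ∀ k ∈ ((PySem.List.enumerate lines s).filter (fun p => PySem.Chars.isIn mt p.2)).map Prod.fst, s ≤ k := by
  intro k hk
  simp only [List.mem_map, List.mem_filter] at hk
  obtain ⟨p, ⟨hp, _⟩, rfl⟩ := hk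
  rw [PySem.List.mem_enumerate_iff] at hp
  obtain ⟨j, hj, rfl⟩ := hp
  simp

-- once = false: A's loop ignores the inserted flag
lemma pvGoA_false_flag (mt it : List Char) (lines : List (List Char)) (b b' : Bool) :
    pvGoA mt it false lines b = pvGoA mt it false lines b' := by
  induction lines generalizing b b' with
  | nil => rfl
  | cons ln rest ih =>
      simp only [pvGoA, Bool.not_false, Bool.or_true, Bool.and_true]
      split_ifs
      all_goals first | rfl | rw [ih b b']

-- once = true, already inserted: A's loop copies the lines
lemma pvGoA_true_done (mt it : List Char) (lines : List (List Char)) :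
    pvGoA mt it true lines true = lines := by
  induction lines with
  | nil => rfl
  | cons ln rest ih => simp [pvGoA, ih]

-- rebuilding with an empty index copies the lines
lemma pvRebuild_nil (it : List Char) (lines : List (List Char)) (s : Int) :
    (PySem.List.enumerate lines s).flatMap
      (fun p => if p.1 ∈ ([] : List Int) then [p.2, it] else [p.2]) = lines := by
  induction lines generalizing s with
  | nil => rfl
  | cons ln rest ih =>
      rw [PySem.List.enumerate_cons, List.flatMap_cons, ih (s + 1)]
      simp

-- the central invariant: phase1+phase2 over enumerate from any start s equals A's loop with inserted = false
lemma pvMain (mt it : List Char) (once : Bool) (lines : List (List Char)) (s : Int) :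
    (PySem.List.enumerate lines s).flatMap
      (fun p => if p.1 ∈ (if once then
              (((PySem.List.enumerate lines s).filter (fun p => PySem.Chars.isIn mt p.2)).map Prod.fst).take 1
            else ((PySem.List.enumerate lines s).filter (fun p => PySem.Chars.isIn mt p.2)).map Prod.fst)
          then [p.2, it] else [p.2])
      = pvGoA mt it once lines false := by
  induction lines generalizing s with
  | nil => cases once <;> rfl
  | cons ln rest ih =>
      have hge := pvIdx0_ge mt rest (s + 1)
      set idxT := ((PySem.List.enumerate rest (s + 1)).filter (fun p => PySem.Chars.isIn mt p.2)).map Prod.fst with hidxT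
      have henum : PySem.List.enumerate (ln :: rest) s = (s, ln) :: PySem.List.enumerate rest (s + 1) :=
        PySem.List.enumerate_cons ..
      by_cases hc : PySem.Chars.isIn mt ln = true
      · -- head matches
        have hfilter : ((PySem.List.enumerate (ln :: rest) s).filter (fun p => PySem.Chars.isIn mt p.2)).map Prod.fst
            = s :: idxT := by
          rw [henum]; simp [hc, hidxT]
        cases once with
        | true =>
            simp only [reduceIte, hfilter, List.take_succ_cons, List.take_zero]
            rw [henum, List.flatMap_cons]
            have htail : (PySem.List.enumerate rest (s + 1)).flatMap
                (fun p => if p.1 ∈ ([s] : List Int) then [p.2, it] else [p.2]) = rest := by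
              have hcong : ∀ p ∈ PySem.List.enumerate rest (s + 1),
                  (if p.1 ∈ ([s] : List Int) then [p.2, it] else [p.2]) =
                  (if p.1 ∈ ([] : List Int) then [p.2, it] else [p.2]) := by
                intro p hp
                rw [PySem.List.mem_enumerate_iff] at hp
                obtain ⟨j, hj, rfl⟩ := hp
                have hne : (s + 1 + (j : Int)) ≠ s := by omega
                simp [hne]
              rw [List.flatMap_congr hcong, pvRebuild_nil]
            rw [htail]
            simp [pvGoA, hc, pvGoA_true_done]
        | false =>
            simp only [Bool.false_eq_true, if_false, hfilter]
            rw [henum, List.flatMap_cons]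
            have htail : (PySem.List.enumerate rest (s + 1)).flatMap
                (fun p => if p.1 ∈ s :: idxT then [p.2, it] else [p.2]) =
                (PySem.List.enumerate rest (s + 1)).flatMap
                (fun p => if p.1 ∈ idxT then [p.2, it] else [p.2]) := by
              apply List.flatMap_congr
              intro p hp
              rw [PySem.List.mem_enumerate_iff] at hp
              obtain ⟨j, hj, rfl⟩ := hp
              have hne : (s + 1 + (j : Int)) ≠ s := by omega
              simp [List.mem_cons, hne]
            rw [htail]
            have ihr := ih (s + 1)
            simp only [Bool.false_eq_true, if_false] at ihr
            rw [← hidxT] at ihr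
            rw [ihr]
            simp [pvGoA, hc, pvGoA_false_flag mt it rest true false]
      · -- head does not match
        have hfilter : ((PySem.List.enumerate (ln :: rest) s).filter (fun p => PySem.Chars.isIn mt p.2)).map Prod.fst
            = idxT := by
          rw [henum]; simp [hc, hidxT]
        have hsub : ∀ k ∈ (if once then idxT.take 1 else idxT), s + 1 ≤ k := by
          intro k hk
          apply hge
          cases once with
          | true => exact List.mem_of_mem_take (by simpa using hk)
          | false => simpa using hk
        have hsout : s ∉ (if once then idxT.take 1 else idxT) := by
          intro h; have := hsub s h; omega
        have hifx : (if once then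
              (((PySem.List.enumerate (ln :: rest) s).filter (fun p => PySem.Chars.isIn mt p.2)).map Prod.fst).take 1
            else ((PySem.List.enumerate (ln :: rest) s).filter (fun p => PySem.Chars.isIn mt p.2)).map Prod.fst)
            = (if once then idxT.take 1 else idxT) := by
          rw [hfilter]
        rw [hifx, henum, List.flatMap_cons]
        simp only [hsout, if_false]
        have htail : (PySem.List.enumerate rest (s + 1)).flatMap
            (fun p => if p.1 ∈ (if once then idxT.take 1 else idxT) then [p.2, it] else [p.2]) =
            pvGoA mt it once rest false := by
          have ihr := ih (s + 1)
          rw [← hidxT] at ihr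
          exact ihr
        rw [htail]
        simp [pvGoA, hc]

-- ===== VERDICT (by name: the statement is the Claim_ definition above) =====
theorem insert_after_py_spec : Claim_equal_insert_after_py := by
  intro text match_ insert_text once _
  show String.mk (PySem.Chars.join []
        (pvGoA match_.toList insert_text.toList once (pvSplitlinesKeep text.toList []) false)) =
      String.mk (PySem.Chars.join []
        ((PySem.List.enumerate (pvSplitlinesKeep text.toList []) 0).flatMap
          (fun p => if p.1 ∈ (if once then
                (((PySem.List.enumerate (pvSplitlinesKeep text.toList []) 0).filter
                    (fun p => PySem.Chars.isIn match_.toList p.2)).map Prod.fst).take 1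
              else ((PySem.List.enumerate (pvSplitlinesKeep text.toList []) 0).filter
                    (fun p => PySem.Chars.isIn match_.toList p.2)).map Prod.fst)
            then [p.2, insert_text.toList] else [p.2])))
  rw [pvMain]
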